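-- pv_equiv track=rewrite | github.com/pypalkar23/JavaProblems | src/practice/levelUp.py | levelUp
-- ===== SOURCE A (Python) =====
-- def levelUp(k, scores):
--     if k<=0:
--         return 0
--     scores= sorted(scores, reverse=True)
--     rank =1
--     res = 0
--     for i in range(0, len(scores)):
--         if i==0:
--             rank = 1
--         elif scores[i] != scores[i-1]:
--             rank = i+1
--         if rank <=k and scores[i]>0:
--             res+=1
--         else:
--             break
--
--     return res
-- ===== SOURCE B (Python) =====
-- def levelUp(k, scores):
--     # Counting characterization: a score counts iff it is positive and its
--     # competition rank (1 + number of strictly greater scores) is at most k.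
--     return sum(1 for s in scores if s > 0 and sum(1 for x in scores if x > s) < k)
-- ===== Notes on version B (the rewrite author's own statement) =====
-- stated objective: simpler
-- what changed: Replaces the sort + stateful rank/break loop by a one-line counting characterization: a score counts iff it is positive and fewer than k scores are strictly greater (competition rank <= k).
import Mathlib
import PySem

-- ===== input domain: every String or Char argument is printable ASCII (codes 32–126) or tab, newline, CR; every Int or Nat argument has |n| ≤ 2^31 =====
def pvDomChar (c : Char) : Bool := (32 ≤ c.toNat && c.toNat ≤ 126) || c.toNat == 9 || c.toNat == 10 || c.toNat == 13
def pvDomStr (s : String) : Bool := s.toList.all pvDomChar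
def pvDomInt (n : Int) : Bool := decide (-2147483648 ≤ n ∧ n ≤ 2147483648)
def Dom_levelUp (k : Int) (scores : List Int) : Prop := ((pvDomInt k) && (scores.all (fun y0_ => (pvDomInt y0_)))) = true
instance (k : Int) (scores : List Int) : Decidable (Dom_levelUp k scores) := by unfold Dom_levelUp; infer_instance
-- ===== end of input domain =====

-- B replaces A's sort + stateful rank/break loop by a direct counting characterization
-- (positive and fewer than k strictly greater scores); objective: simpler.


-- ===== PORT A =====
-- the for-range loop with the early 'break': recursion on the index i, state (rank, res)
def levelUpLoop (k : Int) (ss : List Int) (i : Nat) (rank res : Int) : Int :=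
  if i < ss.length then
    let rank' : Int :=
      if i = 0 then 1
      else if ss.getD i 0 ≠ ss.getD (i - 1) 0 then (i : Int) + 1
      else rank
    if rank' ≤ k ∧ 0 < ss.getD i 0 then levelUpLoop k ss (i + 1) rank' (res + 1)
    else res
  else res
termination_by ss.length - i

def levelUp (k : Int) (scores : List Int) : Int :=
  if k ≤ 0 then 0
  else levelUpLoop k (PySem.List.sorted scores (fun x => x) true) 0 1 0

-- ===== PORT B =====
def levelUp_alt (k : Int) (scores : List Int) : Int :=
  ((scores.countP (fun s =>
      decide (0 < s) && decide (((scores.countP (fun x => decide (s < x)) : Nat) : Int) < k))) : Int)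

-- ===== PRECONDITION & SPEC =====
def Spec_levelUp (k : Int) (scores : List Int) (out : Int) : Prop := out = levelUp_alt k scores
instance (k : Int) (scores : List Int) (out : Int) : Decidable (Spec_levelUp k scores out) := by unfold Spec_levelUp; infer_instance

-- ===== CLAIM (what is proved, stated in full; the proofs are below) =====
def Claim_equal_levelUp : Prop := ∀ (k : Int) (scores : List Int), Dom_levelUp k scores → Spec_levelUp k scores (levelUp k scores)

-- ===== LEMMAS AND PROOFS =====

-- the predicate B counts, with the strictly-greater count taken over a reference list l
def goodP (k : Int) (l : List Int) (s : Int) : Bool :=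
  decide (0 < s) && decide (((l.countP (fun x => decide (s < x)) : Nat) : Int) < k)

lemma countP_ext (l : List Int) (p q : Int → Bool) (h : ∀ a ∈ l, p a = q a) :
    l.countP p = l.countP q := by
  induction l with
  | nil => rfl
  | cons x t ih => simp [List.countP_cons, h x (by simp), ih (fun a ha => h a (by simp [ha]))]

-- on a descending list, once goodP fails it fails forever: takeWhile-length = countP
lemma takeWhile_len_eq_countP (p : Int → Bool)
    (hmono : ∀ a b : Int, b ≤ a → p b = true → p a = true) :
    ∀ l : List Int, l.Pairwise (fun a b => b ≤ a) →
      (l.takeWhile p).length = l.countP p := by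
  intro l hl
  induction l with
  | nil => simp
  | cons x t ih =>
    rcases List.pairwise_cons.mp hl with ⟨hx, ht⟩
    by_cases hpx : p x = true
    · simp [hpx, ih ht]
    · have h0 : t.countP p = 0 := by
        rw [List.countP_eq_zero]
        intro y hy hpy
        exact hpx (hmono x y (hx y hy) hpy)
      simp [hpx, h0]

lemma goodP_mono (k : Int) (l : List Int) :
    ∀ a b : Int, b ≤ a → goodP k l b = true → goodP k l a = true := by
  intro a b hba hb
  unfold goodP at *
  simp only [Bool.and_eq_true, decide_eq_true_eq] at *
  refine ⟨lt_of_lt_of_le hb.1 hba, lt_of_le_of_lt ?_ hb.2⟩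
  have h : l.countP (fun x => decide (a < x)) ≤ l.countP (fun x => decide (b < x)) := by
    apply List.countP_mono_left
    intro x _ hx
    simp only [decide_eq_true_eq] at *
    exact lt_of_le_of_lt hba hx
  exact_mod_cast h

-- in a descending list every element is at most the head-side entries: count of strictly
-- greater elements of ss[i] is 0 when i = 0 …
lemma cg_head (ss : List Int) (hs : ss.Pairwise (fun a b => b ≤ a))
    (hi : 0 < ss.length) :
    ss.countP (fun x => decide (ss[0]'hi < x)) = 0 := by
  have hg := List.pairwise_iff_getElem.mp hs
  rw [List.countP_eq_zero]
  intro y hy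
  rcases List.mem_iff_getElem.mp hy with ⟨j, hj, rfl⟩
  simp only [decide_eq_true_eq, not_lt]
  rcases Nat.eq_zero_or_pos j with h0 | h0
  · subst h0; rfl
  · exact hg 0 j hi hj h0

-- … and is exactly i when a strictly smaller value starts at position i
lemma cg_at_new_value (ss : List Int) (hs : ss.Pairwise (fun a b => b ≤ a))
    (i : Nat) (hi : i < ss.length) (h0 : 0 < i)
    (hi1 : i - 1 < ss.length)
    (hne : ss[i]'hi ≠ ss[i-1]'hi1) :
    ss.countP (fun x => decide (ss[i]'hi < x)) = i := by
  have hg := List.pairwise_iff_getElem.mp hs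
  have hlt : ss[i]'hi < ss[i-1]'hi1 :=
    lt_of_le_of_ne (hg (i-1) i hi1 hi (by omega)) hne
  have htake : (ss.take i).countP (fun x => decide (ss[i]'hi < x)) = (ss.take i).length := by
    rw [List.countP_eq_length]
    intro a ha
    rcases List.mem_iff_getElem.mp ha with ⟨j, hj, rfl⟩
    have hjlen : j < ss.length := by simp at hj; omega
    have hji : j < i := by simp at hj; omega
    rw [List.getElem_take]
    simp only [decide_eq_true_eq]
    rcases Nat.lt_or_ge j (i-1) with hcase | hcase
    · exact lt_of_lt_of_le hlt (hg j (i-1) hjlen hi1 hcase)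
    · have : j = i - 1 := by omega
      subst this; exact hlt
  have hdrop : (ss.drop i).countP (fun x => decide (ss[i]'hi < x)) = 0 := by
    rw [List.countP_eq_zero]
    intro a ha
    rcases List.mem_iff_getElem.mp ha with ⟨j, hj, rfl⟩
    have hjlen : i + j < ss.length := by simp at hj; omega
    rw [List.getElem_drop]
    simp only [decide_eq_true_eq, not_lt]
    rcases Nat.eq_zero_or_pos j with hz | hz
    · subst hz; rfl
    · exact hg i (i+j) hi hjlen (by omega)
  calc ss.countP (fun x => decide (ss[i]'hi < x))
      = (ss.take i ++ ss.drop i).countP (fun x => decide (ss[i]'hi < x)) := by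
        rw [List.take_append_drop]
    _ = i := by
        rw [List.countP_append, htake, hdrop, List.length_take]
        omega

-- the loop counts the longest goodP-prefix starting at position i
lemma loop_eq (k : Int) (ss : List Int) (hs : ss.Pairwise (fun a b => b ≤ a)) :
    ∀ n i rank res, ss.length - i ≤ n → i ≤ ss.length →
      (i = 0 ∧ rank = 1 ∨
        0 < i ∧ i - 1 < ss.length ∧
          rank = ((ss.countP (fun x => decide (ss.getD (i-1) 0 < x)) : Nat) : Int) + 1) →
      levelUpLoop k ss i rank res
        = res + (((ss.drop i).takeWhile (goodP k ss)).length : Int) := by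
  intro n
  induction n with
  | zero =>
    intro i rank res hn hile _
    have : i = ss.length := by omega
    subst this
    rw [levelUpLoop]
    simp
  | succ n ih =>
    intro i rank res hn hile hinv
    rw [levelUpLoop]
    by_cases hi : i < ss.length
    · simp only [if_pos hi]
      have hgetD : ss.getD i 0 = ss[i]'hi := List.getD_eq_getElem ss 0 hi
      -- the newly computed rank is always 1 + (# strictly greater than ss[i] in ss)
      have hrank' :
          (if i = 0 then (1:Int)
           else if ss.getD i 0 ≠ ss.getD (i - 1) 0 then (i : Int) + 1
           else rank)
          = ((ss.countP (fun x => decide (ss[i]'hi < x)) : Nat) : Int) + 1 := by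
        by_cases h0 : i = 0
        · subst h0
          rw [if_pos rfl, cg_head ss hs hi]
          rfl
        · have hi1 : i - 1 < ss.length := by omega
          have hgetD1 : ss.getD (i-1) 0 = ss[i-1]'hi1 := List.getD_eq_getElem ss 0 hi1
          rw [if_neg h0]
          by_cases hne : ss.getD i 0 ≠ ss.getD (i - 1) 0
          · rw [if_pos hne,
              cg_at_new_value ss hs i hi (by omega) hi1 (by rw [← hgetD, ← hgetD1]; exact hne)]
          · rw [if_neg hne]
            rcases hinv with ⟨hz, _⟩ | ⟨_, _, hrank⟩
            · omega
            · have heq : ss.getD i 0 = ss.getD (i-1) 0 := by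
                by_contra hc; exact hne hc
              rw [hrank, ← heq, hgetD]
      rw [hrank']
      have hdropcons : ss.drop i = ss[i]'hi :: ss.drop (i+1) := List.drop_eq_getElem_cons hi
      by_cases hgood : goodP k ss (ss[i]'hi) = true
      · have hcond : ((ss.countP (fun x => decide (ss[i]'hi < x)) : Nat) : Int) + 1 ≤ k
            ∧ 0 < ss.getD i 0 := by
          unfold goodP at hgood
          simp only [Bool.and_eq_true, decide_eq_true_eq] at hgood
          exact ⟨by omega, by rw [hgetD]; exact hgood.1⟩
        rw [if_pos hcond,
          ih (i+1) _ (res+1) (by omega) (by omega)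
            (Or.inr ⟨by omega, by simpa using hi, by
              rw [Nat.add_sub_cancel, List.getD_eq_getElem ss 0 hi]⟩)]
        rw [hdropcons, List.takeWhile_cons, if_pos hgood]
        simp only [List.length_cons]
        push_cast
        ring
      · have hcond : ¬ (((ss.countP (fun x => decide (ss[i]'hi < x)) : Nat) : Int) + 1 ≤ k
            ∧ 0 < ss.getD i 0) := by
          unfold goodP at hgood
          simp only [Bool.and_eq_true, decide_eq_true_eq] at hgood
          rw [hgetD]
          intro hc
          exact hgood ⟨hc.2, by omega⟩
        rw [if_neg hcond, hdropcons, List.takeWhile_cons, if_neg hgood]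
        simp
    · simp only [if_neg hi]
      have : i = ss.length := by omega
      subst this
      simp

theorem levelUp_eq_alt (k : Int) (scores : List Int) : levelUp k scores = levelUp_alt k scores := by
  unfold levelUp levelUp_alt
  by_cases hk : k ≤ 0
  · rw [if_pos hk]
    have h0 : scores.countP (fun s =>
        decide (0 < s) && decide (((scores.countP (fun x => decide (s < x)) : Nat) : Int) < k)) = 0 := by
      rw [List.countP_eq_zero]
      intro s _
      simp only [Bool.and_eq_true, decide_eq_true_eq, not_and]
      intro _
      have : (0:Int) ≤ ((scores.countP (fun x => decide (s < x)) : Nat) : Int) := Int.natCast_nonneg _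
      omega
    rw [h0]; rfl
  · rw [if_neg hk]
    have hperm : (PySem.List.sorted scores (fun x => x) true).Perm scores :=
      PySem.List.sorted_perm scores (fun x => x) true
    have hs : (PySem.List.sorted scores (fun x => x) true).Pairwise (fun a b => b ≤ a) :=
      PySem.List.sorted_pairwise_rev scores (fun x => x)
    set ss := PySem.List.sorted scores (fun x => x) true with hss
    rw [loop_eq k ss hs ss.length 0 1 0 (by omega) (by omega) (Or.inl ⟨rfl, rfl⟩)]
    rw [List.drop_zero, takeWhile_len_eq_countP (goodP k ss) (goodP_mono k ss) ss hs]
    have hcg : ∀ s : Int,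
        ss.countP (fun x => decide (s < x)) = scores.countP (fun x => decide (s < x)) :=
      fun s => hperm.countP_congr (fun x _ => rfl)
    have hsw : ss.countP (goodP k ss) = scores.countP (goodP k scores) := by
      rw [countP_ext ss (goodP k ss) (goodP k scores) (fun a _ => by unfold goodP; rw [hcg a])]
      exact hperm.countP_congr (fun x _ => rfl)
    rw [show (fun s => decide (0 < s) &&
        decide (((List.countP (fun x => decide (s < x)) scores : Nat) : Int) < k)) = goodP k scores
      from rfl, ← hsw]
    ring

-- ===== VERDICT (by name: the statement is the Claim_ definition above) =====
theorem levelUp_spec : Claim_equal_levelUp := by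
  intro k scores _
  unfold Spec_levelUp
  exact levelUp_eq_alt k scores
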